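-- pv_equiv track=rewrite | github.com/endj/AOC-2025 | day3/day3.py | safe_ranges
-- ===== SOURCE A (Python) =====
-- def safe_ranges(data):
--     res = []
--     i = data.find("don't()")
--     res.append((0,i))
--     needle = i + len("don't()")
--     if needle == -1:
--         return res
--
--     while needle < len(data):
--        do = data.find("do()", needle)
--        if do == -1: return res
--
--        dont = data.find("don't()", do + len("do()"))
--        if dont == -1:
--            res.append((do+ len("do()"), len(data)))
--            return res
--
--        res.append((do + len("do()"), dont))
--        needle = dont + len("don't()")
--     return res
-- ===== SOURCE B (Python) =====
-- def safe_ranges(data):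
--     i = data.find("don't()")
--     res = [(0, i)]
--     # one pass: table of all do()/don't() markers from index i + 7 on
--     markers = []
--     for p in range(i + 7, len(data)):
--         if data.startswith("don't()", p):
--             markers.append((p, False))
--         elif data.startswith("do()", p):
--             markers.append((p, True))
--     start = None  # None = disabled; else start index of the open safe range
--     for p, is_do in markers:
--         if start is None:
--             if is_do:
--                 start = p + 4
--         elif not is_do:
--             res.append((start, p))
--             start = None
--     if start is not None:
--         res.append((start, len(data)))
--     return res
-- ===== Notes on version B (the rewrite author's own statement) =====
-- stated objective: alternative
-- what changed: Instead of A's interleaved rescanning with str.find for alternating do()/don't() markers, B builds the table of all marker positions after the first don't() in one left-to-right pass and runs an enabled/disabled state machine over that table.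
import Mathlib
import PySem

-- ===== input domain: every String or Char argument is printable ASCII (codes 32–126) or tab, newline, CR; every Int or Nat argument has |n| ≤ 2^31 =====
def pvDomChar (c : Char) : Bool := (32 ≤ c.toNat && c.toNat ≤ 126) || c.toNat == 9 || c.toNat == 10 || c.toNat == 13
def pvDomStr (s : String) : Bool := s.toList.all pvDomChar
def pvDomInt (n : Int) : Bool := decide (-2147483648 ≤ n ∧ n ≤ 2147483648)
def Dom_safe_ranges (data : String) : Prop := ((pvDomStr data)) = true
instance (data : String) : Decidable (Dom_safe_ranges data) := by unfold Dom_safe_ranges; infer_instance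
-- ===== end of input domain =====

-- B replaces A's interleaved str.find rescanning by a one-pass marker table plus a do()/don't()
-- state machine run over it (alternative algorithm, similar cost).


-- ===== PORT A =====
-- termination fact used by the while-loop port: a successful find result is ≥ its start and ≥ 0
theorem pvFindFrom_ge (s sub : List Char) (start : Int)
    (h : PySem.Chars.findFrom s sub start none ≠ -1) :
    start ≤ PySem.Chars.findFrom s sub start none ∧ 0 ≤ PySem.Chars.findFrom s sub start none := by
  unfold PySem.Chars.findFrom at h ⊢
  dsimp only at h ⊢
  set st := if start < 0 then if start + ↑s.length < 0 then 0 else start + ↑s.length else start with hst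
  have hst0 : 0 ≤ st ∧ start ≤ st := by
    rw [hst]; split_ifs <;> omega
  have hr := PySem.Chars.neg_one_le_find (List.drop st.toNat (List.take (↑s.length : Int).toNat s)) sub
  split_ifs at h ⊢ <;> omega

-- the while-loop of A: needle advances via data.find("do()", needle) / data.find("don't()", do+4)
def loopA (s : List Char) (needle : Int) (res : List (Int × Int)) : List (Int × Int) :=
  if needle < (s.length : Int) then
    if hd : PySem.Chars.findFrom s "do()".toList needle = -1 then res
    else if hq : PySem.Chars.findFrom s "don't()".toList
        (PySem.Chars.findFrom s "do()".toList needle + 4) = -1 then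
      res ++ [(PySem.Chars.findFrom s "do()".toList needle + 4, (s.length : Int))]
    else
      loopA s
        (PySem.Chars.findFrom s "don't()".toList (PySem.Chars.findFrom s "do()".toList needle + 4) + 7)
        (res ++ [(PySem.Chars.findFrom s "do()".toList needle + 4,
                  PySem.Chars.findFrom s "don't()".toList (PySem.Chars.findFrom s "do()".toList needle + 4))])
  else res
termination_by ((s.length : Int) - needle).toNat
decreasing_by
  have h1 := pvFindFrom_ge s "do()".toList needle hd
  have h2 := pvFindFrom_ge s "don't()".toList (PySem.Chars.findFrom s "do()".toList needle + 4) hq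
  omega

def safe_ranges (data : String) : List (Int × Int) :=
  let i := PySem.Str.find data "don't()"
  let res : List (Int × Int) := [(0, i)]
  let needle := i + 7          -- len("don't()") = 7
  if needle = -1 then res
  else loopA data.toList needle res

-- ===== PORT B =====
-- the body of B's state-machine loop: state = (res so far, start of the open safe range if enabled)
def stepB (acc : List (Int × Int) × Option Int) (m : Int × Bool) : List (Int × Int) × Option Int :=
  match acc.2 with
  | none => if m.2 then (acc.1, some (m.1 + 4)) else acc
  | some st => if m.2 then acc else (acc.1 ++ [(st, m.1)], none)

def safe_ranges_alt (data : String) : List (Int × Int) :=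
  let s := data.toList
  let i := PySem.Str.find data "don't()"
  let res : List (Int × Int) := [(0, i)]
  -- data.startswith(pat, p) for 0 ≤ p is exactly: pat is a prefix of s dropped at p
  let markers := (PySem.List.pyRange (i + 7) (s.length : Int) 1).foldl
    (fun acc p =>
      if PySem.Chars.startswith (s.drop p.toNat) "don't()".toList then acc ++ [(p, false)]
      else if PySem.Chars.startswith (s.drop p.toNat) "do()".toList then acc ++ [(p, true)]
      else acc) []
  let fin := markers.foldl stepB (res, none)
  match fin.2 with
  | some st => fin.1 ++ [(st, (s.length : Int))]
  | none => fin.1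

-- ===== PRECONDITION & SPEC =====
def Spec_safe_ranges (data : String) (out : List (Int × Int)) : Prop :=
  out = safe_ranges_alt data
instance (data : String) (out : List (Int × Int)) : Decidable (Spec_safe_ranges data out) := by
  unfold Spec_safe_ranges; infer_instance

-- ===== CLAIM =====
def Claim_equal_safe_ranges : Prop :=
  ∀ (data : String), Dom_safe_ranges data → Spec_safe_ranges data (safe_ranges data)

-- ===== LEMMAS AND PROOFS =====

-- one marker-table entry at position p
def pvG (s : List Char) (p : Nat) : List (Int × Bool) :=
  if PySem.Chars.startswith (s.drop p) "don't()".toList then [((p : Int), false)]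
  else if PySem.Chars.startswith (s.drop p) "do()".toList then [((p : Int), true)]
  else []

-- the marker table of positions k, k+1, …, len-1
def pvMk (s : List Char) (k : Nat) : List (Int × Bool) :=
  (List.range' k (s.length - k)).flatMap (pvG s)

-- the machine's final step: an open safe range is closed at the end of the data
def pvFinish (s : List Char) (acc : List (Int × Int) × Option Int) : List (Int × Int) :=
  match acc.2 with
  | some st => acc.1 ++ [(st, (s.length : Int))]
  | none => acc.1

theorem pvMk_eq_nil (s : List Char) (k : Nat) (h : s.length ≤ k) : pvMk s k = [] := by
  unfold pvMk
  have : s.length - k = 0 := by omega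
  simp [this]

theorem pvMk_split (s : List Char) (k m : Nat) (h1 : k ≤ m) (h2 : m ≤ s.length) :
    pvMk s k = (List.range' k (m - k)).flatMap (pvG s) ++ pvMk s m := by
  unfold pvMk
  rw [← List.flatMap_append]
  congr 1
  have h4 : s.length - k = (m - k) + (s.length - m) := by omega
  rw [h4, ← List.range'_append]
  have h5 : k + 1 * (m - k) = m := by omega
  rw [h5]

theorem pvMk_cons (s : List Char) (k : Nat) (h : k < s.length) :
    pvMk s k = pvG s k ++ pvMk s (k + 1) := by
  unfold pvMk
  have h3 : s.length - k = (s.length - (k+1)) + 1 := by omega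
  rw [h3, List.range'_succ]
  simp

-- a prefix determines the characters it covers
theorem pvPrefix_getElem? (l t : List Char) (j : Nat) (h : l <+: t) (hj : j < l.length) :
    t[j]? = l[j]? := by
  obtain ⟨u, rfl⟩ := h
  rw [List.getElem?_append_left hj]

-- both markers start with 'd'
theorem pvMarker_d (s : List Char) (p : Nat) (h : pvG s p ≠ []) : s[p]? = some 'd' := by
  unfold pvG at h
  split_ifs at h with h1 h2
  · have hp : "don't()".toList <+: s.drop p := List.isPrefixOf_iff_prefix.mp h1
    have := pvPrefix_getElem? _ _ 0 hp (by decide)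
    rw [List.getElem?_drop] at this
    simpa using this
  · have hp : "do()".toList <+: s.drop p := List.isPrefixOf_iff_prefix.mp h2
    have := pvPrefix_getElem? _ _ 0 hp (by decide)
    rw [List.getElem?_drop] at this
    simpa using this
  · exact absurd rfl h

-- no marker can start strictly inside a "don't()" occurrence
theorem pvNoMarker_in_dont (s : List Char) (q p : Nat)
    (h : "don't()".toList <+: s.drop q) (h1 : q < p) (h2 : p < q + 7) : pvG s p = [] := by
  by_contra hne
  have hd := pvMarker_d s p hne
  have hj : p - q < ("don't()".toList).length := by simp; omega
  have := pvPrefix_getElem? _ _ (p - q) h hj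
  rw [List.getElem?_drop] at this
  have hqp : q + (p - q) = p := by omega
  rw [hqp] at this
  rw [hd] at this
  have hpq : p - q = 1 ∨ p - q = 2 ∨ p - q = 3 ∨ p - q = 4 ∨ p - q = 5 ∨ p - q = 6 := by omega
  rcases hpq with h5|h5|h5|h5|h5|h5 <;> rw [h5] at this <;> simp at this

-- no "don't()" can start strictly inside a "do()" occurrence
theorem pvNoDont_in_do (s : List Char) (d p : Nat)
    (h : "do()".toList <+: s.drop d) (h1 : d < p) (h2 : p < d + 4) :
    ¬ ("don't()".toList <+: s.drop p) := by
  intro hp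
  have hd : s[p]? = some 'd' := by
    have := pvPrefix_getElem? _ _ 0 hp (by decide)
    rw [List.getElem?_drop] at this
    simpa using this
  have hj : p - d < ("do()".toList).length := by simp; omega
  have := pvPrefix_getElem? _ _ (p - d) h hj
  rw [List.getElem?_drop] at this
  have hqp : d + (p - d) = p := by omega
  rw [hqp, hd] at this
  have hpd : p - d = 1 ∨ p - d = 2 ∨ p - d = 3 := by omega
  rcases hpd with h5|h5|h5 <;> rw [h5] at this <;> simp at this

-- "don't()" is not a prefix where "do()" is (they differ at offset 2)
theorem pvNotBoth (s : List Char) (d : Nat) (h : "do()".toList <+: s.drop d) :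
    ¬ ("don't()".toList <+: s.drop d) := by
  intro h7
  have e1 := pvPrefix_getElem? _ _ 2 h (by decide)
  have e2 := pvPrefix_getElem? _ _ 2 h7 (by decide)
  rw [e1] at e2
  simp at e2

-- a prefix at p ≥ k is an infix of the suffix at k
theorem pvPrefix_drop_infix (pat s : List Char) (p k : Nat)
    (h : pat <+: s.drop p) (hk : k ≤ p) : pat <:+: s.drop k := by
  have : s.drop p = (s.drop k).drop (p - k) := by rw [List.drop_drop]; congr 1; omega
  rw [this] at h
  exact h.isInfix.trans (List.drop_suffix _ _).isInfix

-- the machine ignores don't() markers while disabled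
theorem pvSkip_false (L : List (Int × Bool)) (res : List (Int × Int))
    (h : ∀ m ∈ L, m.2 = false) : L.foldl stepB (res, none) = (res, none) := by
  induction L with
  | nil => rfl
  | cons x xs ih =>
      have hx := h x (by simp)
      have : stepB (res, none) x = (res, none) := by
        unfold stepB; simp [hx]
      rw [List.foldl_cons, this]
      exact ih (fun m hm => h m (by simp [hm]))

-- the machine ignores do() markers while enabled
theorem pvSkip_true (L : List (Int × Bool)) (res : List (Int × Int)) (st : Int)
    (h : ∀ m ∈ L, m.2 = true) : L.foldl stepB (res, some st) = (res, some st) := by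
  induction L with
  | nil => rfl
  | cons x xs ih =>
      have hx := h x (by simp)
      have : stepB (res, some st) x = (res, some st) := by
        unfold stepB; simp [hx]
      rw [List.foldl_cons, this]
      exact ih (fun m hm => h m (by simp [hm]))

-- markers in the flatMap table come from marker positions
theorem pvMem_flatMap_range' (s : List Char) (a n : Nat) (m : Int × Bool)
    (hm : m ∈ (List.range' a n).flatMap (pvG s)) :
    ∃ p : Nat, a ≤ p ∧ p < a + n ∧ m ∈ pvG s p := by
  rw [List.mem_flatMap] at hm
  obtain ⟨p, hp, hmp⟩ := hm
  rw [List.mem_range'_1] at hp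
  exact ⟨p, hp.1, hp.2, hmp⟩

-- MAIN: A's while-loop from needle k equals the state machine (disabled) over the table from k
theorem pvStart_iff (t pat : List Char) :
    PySem.Chars.startswith t pat = true ↔ pat <+: t := by
  simp [PySem.Chars.startswith, List.isPrefixOf_iff_prefix]

theorem pvMain (s : List Char) (n k : Nat) (res : List (Int × Int)) (hn : s.length - k < n) :
    loopA s (k : Int) res = pvFinish s ((pvMk s k).foldl stepB (res, none)) := by
  induction n generalizing k res with
  | zero => omega
  | succ n ih =>
    by_cases hk : k < s.length
    · have hk' : (k : Int) < (s.length : Int) := by exact_mod_cast hk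
      by_cases hd : PySem.Chars.findFrom s "do()".toList (k : Int) = -1
      · rw [loopA.eq_def, if_pos hk', dif_pos hd]
        have hno : ¬ ("do()".toList <:+: List.drop k s) :=
          (PySem.Chars.findFrom_natCast_eq_neg_one_iff s "do()".toList k (le_of_lt hk)).mp hd
        have hall : ∀ m ∈ pvMk s k, m.2 = false := by
          intro m hm
          unfold pvMk at hm
          obtain ⟨p, hp1, hp2, hmp⟩ := pvMem_flatMap_range' s k (s.length - k) m hm
          unfold pvG at hmp
          split_ifs at hmp with h1 h2
          · simp only [List.mem_singleton] at hmp
            simp [hmp]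
          · exact absurd
              (pvPrefix_drop_infix "do()".toList s p k ((pvStart_iff _ _).mp h2) hp1) hno
          · simp at hmp
        rw [pvSkip_false _ res hall]
        rfl
      · obtain ⟨hge, hpre, hmin⟩ :=
          PySem.Chars.findFrom_natCast_spec s "do()".toList k (le_of_lt hk) hd
        set dI := PySem.Chars.findFrom s "do()".toList (k : Int) with hdI
        have hk0 : (0 : Int) ≤ (k : Int) := Int.natCast_nonneg k
        have hdN : dI = ((dI.toNat : Nat) : Int) := by omega
        set dN := dI.toNat with hdNdef
        have hkdN : k ≤ dN := by omega
        have h4 : dN + 4 ≤ s.length := by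
          have hl := hpre.length_le
          simp only [List.length_drop] at hl
          have : ("do()".toList).length = 4 := by decide
          omega
        have harg : (dN : Int) + 4 = ((dN + 4 : Nat) : Int) := by push_cast; ring
        -- B side: the table up to the do() marker is skipped, then the machine enables
        have hsplit1 : pvMk s k = ((List.range' k (dN - k)).flatMap (pvG s)) ++ pvMk s dN :=
          pvMk_split s k dN hkdN (by omega)
        have hall1 : ∀ m ∈ (List.range' k (dN - k)).flatMap (pvG s), m.2 = false := by
          intro m hm
          obtain ⟨p, hp1, hp2, hmp⟩ := pvMem_flatMap_range' s k (dN - k) m hm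
          unfold pvG at hmp
          split_ifs at hmp with h1 h2
          · simp only [List.mem_singleton] at hmp
            simp [hmp]
          · exact absurd ((pvStart_iff _ _).mp h2) (hmin p hp1 (by omega))
          · simp at hmp
        have hcons : pvMk s dN = pvG s dN ++ pvMk s (dN + 1) := pvMk_cons s dN (by omega)
        have hgdN : pvG s dN = [((dN : Int), true)] := by
          unfold pvG
          rw [if_neg, if_pos ((pvStart_iff _ _).mpr hpre)]
          intro h7
          exact pvNotBoth s dN hpre ((pvStart_iff _ _).mp h7)
        have hstep1 : List.foldl stepB (res, none) [((dN : Int), true)] = (res, some ((dN : Int) + 4)) := by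
          simp [stepB]
        by_cases hq : PySem.Chars.findFrom s "don't()".toList ((dN + 4 : Nat) : Int) = -1
        · -- no further don't(): A closes at the end of the data, the machine stays enabled
          rw [loopA.eq_def, if_pos hk', dif_neg hd, ← hdI, hdN, harg, dif_pos hq]
          have hno7 : ¬ ("don't()".toList <:+: List.drop (dN + 4) s) :=
            (PySem.Chars.findFrom_natCast_eq_neg_one_iff s "don't()".toList (dN + 4) h4).mp hq
          have hall2 : ∀ m ∈ pvMk s (dN + 1), m.2 = true := by
            intro m hm
            unfold pvMk at hm
            obtain ⟨p, hp1, hp2, hmp⟩ := pvMem_flatMap_range' s (dN + 1) (s.length - (dN + 1)) m hm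
            unfold pvG at hmp
            split_ifs at hmp with h1 h2
            · by_cases hplt : p < dN + 4
              · exact absurd ((pvStart_iff _ _).mp h1)
                  (pvNoDont_in_do s dN p hpre (by omega) hplt)
              · exact absurd
                  (pvPrefix_drop_infix "don't()".toList s p (dN + 4)
                    ((pvStart_iff _ _).mp h1) (by omega)) hno7
            · simp only [List.mem_singleton] at hmp
              simp [hmp]
            · simp at hmp
          rw [hsplit1, List.foldl_append, pvSkip_false _ res hall1, hcons, List.foldl_append,
            hgdN, hstep1, pvSkip_true _ res _ hall2]
          unfold pvFinish
          push_cast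
          rfl
        · -- a further don't(): A appends the closed range and loops; the machine disables
          obtain ⟨hqge, hqpre, hqmin⟩ :=
            PySem.Chars.findFrom_natCast_spec s "don't()".toList (dN + 4) h4 hq
          set qI := PySem.Chars.findFrom s "don't()".toList ((dN + 4 : Nat) : Int) with hqI
          have hqN : qI = ((qI.toNat : Nat) : Int) := by
            have : (0 : Int) ≤ ((dN + 4 : Nat) : Int) := Int.natCast_nonneg _
            omega
          set qN := qI.toNat with hqNdef
          have hdq : dN + 4 ≤ qN := by omega
          have h7 : qN + 7 ≤ s.length := by
            have hl := hqpre.length_le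
            simp only [List.length_drop] at hl
            have : ("don't()".toList).length = 7 := by decide
            omega
          have harg2 : (qN : Int) + 7 = ((qN + 7 : Nat) : Int) := by push_cast; ring
          rw [loopA.eq_def, if_pos hk', dif_neg hd, ← hdI, hdN, harg, dif_neg hq,
            ← hqI, hqN, harg2]
          -- B side: skip to the don't() marker, close the range there, recurse
          have hsplit2 : pvMk s (dN + 1) = ((List.range' (dN + 1) (qN - (dN + 1))).flatMap (pvG s)) ++ pvMk s qN :=
            pvMk_split s (dN + 1) qN (by omega) (by omega)
          have hall2 : ∀ m ∈ (List.range' (dN + 1) (qN - (dN + 1))).flatMap (pvG s), m.2 = true := by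
            intro m hm
            obtain ⟨p, hp1, hp2, hmp⟩ := pvMem_flatMap_range' s (dN + 1) (qN - (dN + 1)) m hm
            unfold pvG at hmp
            split_ifs at hmp with h1 h2
            · by_cases hplt : p < dN + 4
              · exact absurd ((pvStart_iff _ _).mp h1)
                  (pvNoDont_in_do s dN p hpre (by omega) hplt)
              · exact absurd ((pvStart_iff _ _).mp h1) (hqmin p (by omega) (by omega))
            · simp only [List.mem_singleton] at hmp
              simp [hmp]
            · simp at hmp
          have hconsq : pvMk s qN = pvG s qN ++ pvMk s (qN + 1) := pvMk_cons s qN (by omega)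
          have hgq : pvG s qN = [((qN : Int), false)] := by
            unfold pvG
            rw [if_pos ((pvStart_iff _ _).mpr hqpre)]
          have hstep2 : List.foldl stepB (res, some ((dN : Int) + 4)) [((qN : Int), false)] =
              (res ++ [(((dN : Int) + 4), (qN : Int))], none) := by
            simp [stepB]
          have hquiet : pvMk s (qN + 1) = pvMk s (qN + 7) := by
            have hs := pvMk_split s (qN + 1) (qN + 7) (by omega) h7
            have hnil : (List.range' (qN + 1) (qN + 7 - (qN + 1))).flatMap (pvG s) = [] := by
              rw [List.flatMap_eq_nil_iff]
              intro p hp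
              rw [List.mem_range'_1] at hp
              exact pvNoMarker_in_dont s qN p hqpre (by omega) (by omega)
            rw [hs, hnil, List.nil_append]
          rw [hsplit1, List.foldl_append, pvSkip_false _ res hall1, hcons, List.foldl_append,
            hgdN, hstep1, hsplit2, List.foldl_append, pvSkip_true _ res _ hall2,
            hconsq, List.foldl_append, hgq, hstep2, hquiet]
          have hres : res ++ [(((dN : Int) + 4), (qN : Int))] =
              res ++ [((((dN + 4 : Nat)) : Int), (qN : Int))] := by push_cast; rfl
          rw [hres]
          exact ih (qN + 7) (res ++ [((((dN + 4 : Nat)) : Int), (qN : Int))]) (by omega)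
    · rw [loopA.eq_def, if_neg (by exact_mod_cast hk)]
      rw [pvMk_eq_nil s k (by omega)]
      rfl

-- the loop only appends to res
-- B's port equals the machine over the proof-side marker table starting at (find + 7).toNat
theorem pvAlt_eq (data : String) (kN : Nat)
    (hk : PySem.Str.find data "don't()" + 7 = (kN : Int)) :
    safe_ranges_alt data =
      pvFinish data.toList
        ((pvMk data.toList kN).foldl stepB
          ([(0, PySem.Str.find data "don't()")], none)) := by
  unfold safe_ranges_alt
  dsimp only
  rw [hk]
  have hbody : ∀ (acc : List (Int × Bool)), ∀ p ∈ PySem.List.pyRange ((kN : Int)) (data.toList.length : Int) 1,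
      (if PySem.Chars.startswith (data.toList.drop p.toNat) "don't()".toList then acc ++ [(p, false)]
       else if PySem.Chars.startswith (data.toList.drop p.toNat) "do()".toList then acc ++ [(p, true)]
       else acc) = acc ++ pvG data.toList p.toNat := by
    intro acc p hp
    rw [PySem.List.mem_pyRange_one] at hp
    have hp0 : (0 : Int) ≤ p := by omega
    unfold pvG
    have hcast : ((p.toNat : Nat) : Int) = p := Int.toNat_of_nonneg hp0
    split_ifs <;> simp [hcast]
  rw [PySem.List.foldl_congr_mem _ _ _ _ hbody]
  rw [PySem.List.foldl_append_eq_flatMap (fun p => pvG data.toList p.toNat)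
    (PySem.List.pyRange ((kN : Int)) (data.toList.length : Int) 1) []]
  have hrange : (PySem.List.pyRange ((kN : Int)) (data.toList.length : Int) 1).flatMap
      (fun p => pvG data.toList p.toNat) = pvMk data.toList kN := by
    rw [PySem.List.pyRange_one, List.flatMap_map]
    unfold pvMk
    rw [List.range'_eq_map_range, List.flatMap_map]
    have hM : ((data.toList.length : Int) - ((kN : Int))).toNat =
        data.toList.length - kN := by omega
    rw [hM]
    congr 1
  rw [hrange]
  rfl

-- ===== VERDICT =====
theorem safe_ranges_spec : Claim_equal_safe_ranges := by
  intro data _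
  unfold Spec_safe_ranges
  have hge : -1 ≤ PySem.Str.find data "don't()" := by
    rw [PySem.Str.find_eq]
    exact PySem.Chars.neg_one_le_find _ _
  have hcast : PySem.Str.find data "don't()" + 7 =
      (((PySem.Str.find data "don't()" + 7).toNat : Nat) : Int) := by omega
  have hA : safe_ranges data =
      loopA data.toList (PySem.Str.find data "don't()" + 7)
        [(0, PySem.Str.find data "don't()")] := by
    unfold safe_ranges
    rw [if_neg (by omega)]
  rw [hA, pvAlt_eq data (PySem.Str.find data "don't()" + 7).toNat hcast, hcast]
  exact pvMain data.toList (data.toList.length + 1)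
    (PySem.Str.find data "don't()" + 7).toNat
    [(0, PySem.Str.find data "don't()")] (by omega)
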